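-- pv_equiv track=rewrite | github.com/TaterTotterson/Tater_Shop | cores/ai_task_core.py | _normalize_monthdays
-- ===== SOURCE A (Python) =====
-- from typing import Any, Dict, List, Optional, Tuple
--
-- def _as_int(value: Any, default: int = 0) -> int:
--     try:
--         return int(value)
--     except Exception:
--         return int(default)
--
-- def _normalize_monthdays(raw: Any) -> List[int]:
--     if not isinstance(raw, list):
--         return []
--     out: List[int] = []
--     for item in raw:
--         day = _as_int(item, -1)
--         if 1 <= day <= 31:
--             out.append(day)
--     if not out:
--         return []
--     return sorted(set(out))
-- ===== SOURCE B (Python) =====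
-- from typing import Any, List
--
-- def _as_int(value: Any, default: int = 0) -> int:
--     try:
--         return int(value)
--     except Exception:
--         return int(default)
--
-- def _normalize_monthdays(raw: Any) -> List[int]:
--     if not isinstance(raw, list):
--         return []
--     present = [False] * 32
--     for item in raw:
--         day = _as_int(item, -1)
--         if 1 <= day <= 31:
--             present[day] = True
--     return [d for d in range(1, 32) if present[d]]
-- ===== Notes on version B (the rewrite author's own statement) =====
-- stated objective: alternative
-- what changed: Replaces the collect-list + set-dedupe + comparison-sort with a fixed 32-slot boolean bucket array marked in one pass and read out in index order (a bounded counting-sort), which dedupes and sorts for free.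
import Mathlib
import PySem

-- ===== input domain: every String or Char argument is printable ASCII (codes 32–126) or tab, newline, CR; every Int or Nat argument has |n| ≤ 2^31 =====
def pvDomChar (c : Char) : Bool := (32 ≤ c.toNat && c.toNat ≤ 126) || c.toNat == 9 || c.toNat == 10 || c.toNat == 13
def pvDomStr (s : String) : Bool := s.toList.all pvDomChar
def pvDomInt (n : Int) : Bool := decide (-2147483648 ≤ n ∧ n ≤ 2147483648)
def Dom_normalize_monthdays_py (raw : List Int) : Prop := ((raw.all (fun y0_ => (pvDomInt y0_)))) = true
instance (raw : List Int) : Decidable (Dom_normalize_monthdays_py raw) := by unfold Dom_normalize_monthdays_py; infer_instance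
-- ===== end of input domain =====

-- B replaces A's collect + set-dedupe + sort with a 32-slot boolean bucket marked in one
-- pass and read out in index order (alternative decomposition; return value only).

-- ===== PORT A =====
-- for item in raw: day = _as_int(item, -1) == item (ints); if 1 <= day <= 31: out.append(day)
def normalize_monthdays_py (raw : List Int) : List Int :=
  let out := raw.foldl (fun out item =>
    if 1 ≤ item ∧ item ≤ 31 then out ++ [item] else out) []
  if out = [] then []
  else PySem.List.sorted (PySem.Set.ofList out) (fun x => x) false

-- ===== PORT B =====
-- present = [False]*32; mark present[day]; read back [d for d in range(1,32) if present[d]]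
def normalize_monthdays_py_alt (raw : List Int) : List Int :=
  let present := raw.foldl (fun p item =>
    if 1 ≤ item ∧ item ≤ 31 then p.set item.toNat true else p)
    (List.replicate 32 false)
  (PySem.List.pyRange 1 32 1).filter (fun d => present.getD d.toNat false)

-- ===== PRECONDITION & SPEC =====
def Spec_normalize_monthdays_py (raw : List Int) (out : List Int) : Prop := out = normalize_monthdays_py_alt raw
instance (raw : List Int) (out : List Int) : Decidable (Spec_normalize_monthdays_py raw out) := by unfold Spec_normalize_monthdays_py; infer_instance

-- ===== CLAIM (what is proved, stated in full; the proofs are below) =====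
def Claim_equal_normalize_monthdays_py : Prop := ∀ (raw : List Int), Dom_normalize_monthdays_py raw → Spec_normalize_monthdays_py raw (normalize_monthdays_py raw)

-- ===== LEMMAS AND PROOFS =====

-- the bucket array stays 32 long and its d-th entry records whether some in-range item equals d
theorem pv_present_getD (raw : List Int) (p : List Bool) (hlen : p.length = 32)
    (d : Nat) (hd : d < 32) :
    ((raw.foldl (fun p item =>
        if 1 ≤ item ∧ item ≤ 31 then p.set item.toNat true else p) p).getD d false)
      = (p.getD d false || raw.any (fun x => decide (1 ≤ x) && decide (x ≤ 31) && decide (x.toNat = d))) := by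
  induction raw generalizing p with
  | nil => simp
  | cons x t ih =>
    simp only [List.foldl_cons, List.any_cons]
    split_ifs with hx
    · rw [ih (p.set x.toNat true) (by simpa using hlen)]
      have hxd : x.toNat < 32 := by omega
      by_cases h : x.toNat = d
      · subst h
        simp [List.getD, hx.1, hx.2, hlen, hxd]
      · simp [List.getD, h, hx.1, hx.2]
    · rw [ih p hlen]
      have h1 : (decide (1 ≤ x) && decide (x ≤ 31) && decide (x.toNat = d)) = false := by
        by_cases ha : 1 ≤ x <;> by_cases hb : x ≤ 31 <;> simp [ha, hb]
        · exact fun _ => absurd ⟨ha, hb⟩ hx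
      rw [h1]
      simp

theorem pv_getD_replicate_false (k : Nat) :
    ((List.replicate 32 false).getD k false) = false := by
  unfold List.getD
  rw [List.getElem?_replicate]
  split <;> simp

theorem normalize_monthdays_py_spec' (raw : List Int) :
    normalize_monthdays_py raw = normalize_monthdays_py_alt raw := by
  unfold normalize_monthdays_py normalize_monthdays_py_alt
  rw [PySem.List.foldl_append_ite_eq_filter]
  simp only [List.nil_append]
  set out := raw.filter (fun x => decide (1 ≤ x ∧ x ≤ 31)) with hout
  set B := (PySem.List.pyRange 1 32 1).filter
      (fun d => (raw.foldl (fun p item =>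
        if 1 ≤ item ∧ item ≤ 31 then p.set item.toNat true else p)
        (List.replicate 32 false)).getD d.toNat false) with hB
  have hmem : ∀ d : Int, d ∈ B ↔ d ∈ PySem.Set.ofList out := by
    intro d
    rw [hB, List.mem_filter, PySem.List.mem_pyRange_one, PySem.Set.mem_ofList, hout,
        List.mem_filter]
    constructor
    · rintro ⟨⟨h1, h2⟩, h3⟩
      rw [pv_present_getD raw _ (by simp) d.toNat (by omega),
          pv_getD_replicate_false] at h3
      simp only [Bool.false_or, List.any_eq_true, Bool.and_eq_true,
        decide_eq_true_eq] at h3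
      obtain ⟨x, hx, ⟨hx1, hx2⟩, hx3⟩ := h3
      have : x = d := by omega
      subst this
      exact ⟨hx, by simp; omega⟩
    · rintro ⟨hd, hr⟩
      simp only [decide_eq_true_eq] at hr
      refine ⟨⟨hr.1, by omega⟩, ?_⟩
      rw [pv_present_getD raw _ (by simp) d.toNat (by omega),
          pv_getD_replicate_false]
      simp only [Bool.false_or, List.any_eq_true, Bool.and_eq_true,
        decide_eq_true_eq]
      exact ⟨d, hd, ⟨hr.1, hr.2⟩, rfl⟩
  have hnodupB : B.Nodup := List.Nodup.filter _ (PySem.List.nodup_pyRange_one 1 32)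
  have hperm : B.Perm (PySem.Set.ofList out) :=
    (List.perm_ext_iff_of_nodup hnodupB (PySem.Set.nodup_ofList out)).2 hmem
  have hpw : B.Pairwise (fun a b : Int => (fun x => x) a < (fun x => x) b) :=
    List.Pairwise.filter _ (PySem.List.pairwise_lt_pyRange_one 1 32)
  have hsorted := PySem.List.sorted_eq_of_perm_of_pairwise_lt
      (xs := PySem.Set.ofList out) (ys := B) (key := fun x => x) hperm hpw
  by_cases h : out = []
  · rw [if_pos h]
    have hperm' : B.Perm (PySem.Set.ofList ([] : List Int)) := h ▸ hperm
    have : B = [] := by simpa [PySem.Set.ofList] using hperm'.eq_nil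
    exact this.symm
  · rw [if_neg h, hsorted]

-- ===== VERDICT (by name: the statement is the Claim_ definition above) =====
theorem normalize_monthdays_py_spec : Claim_equal_normalize_monthdays_py := by
  intro raw _
  exact normalize_monthdays_py_spec' raw
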